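-- pv_equiv track=rewrite | github.com/Yagayev/RL-environment-for-Tetris-Battle | neural.py | hight
-- ===== SOURCE A (Python) =====
-- def hight(metrix):
--     ans = len(metrix)
--     for line in metrix:
--         if max(line) == 0:
--             ans -=1
--         else:
--             return ans
--     return ans
-- ===== SOURCE B (Python) =====
-- def hight(metrix):
--     if not metrix:
--         return 0
--     if max(metrix[0]) != 0:
--         return len(metrix)
--     return hight(metrix[1:])
-- ===== Notes on version B (the rewrite author's own statement) =====
-- stated objective: simpler
-- what changed: B is a structural recursion on the list of rows: the empty grid gives 0, a first row with non-zero max gives the length of the remaining suffix directly, otherwise recurse on the tail -- replacing A's iterative loop with a decremented accumulator and early return.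
import Mathlib
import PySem

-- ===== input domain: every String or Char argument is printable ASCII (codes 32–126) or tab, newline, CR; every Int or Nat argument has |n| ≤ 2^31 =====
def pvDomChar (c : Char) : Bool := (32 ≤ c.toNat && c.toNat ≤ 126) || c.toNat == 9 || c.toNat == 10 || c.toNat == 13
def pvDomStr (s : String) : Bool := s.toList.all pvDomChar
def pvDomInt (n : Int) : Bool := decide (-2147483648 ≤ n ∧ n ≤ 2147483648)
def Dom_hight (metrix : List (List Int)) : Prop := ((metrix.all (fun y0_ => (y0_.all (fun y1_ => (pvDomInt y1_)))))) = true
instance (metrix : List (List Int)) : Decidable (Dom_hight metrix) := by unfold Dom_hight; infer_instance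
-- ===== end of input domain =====

-- B recomputes the height by structural recursion on the rows (suffix length at the
-- first non-zero-max row) instead of A's loop with a decremented accumulator; return
-- value only, no mutation.

-- ===== PORT A =====
-- A's for-loop with early return: accumulator ans, decremented per zero-max row.
-- max(line) on an empty line raises ValueError in Python; the `none` branch is
-- unreachable under Pre_hight (value 0 is arbitrary).
def hightA_loop (lines : List (List Int)) (ans : Int) : Int :=
  match lines with
  | [] => ans
  | line :: rest =>
    match PySem.List.max? line (fun y => y) with
    | none => 0
    | some m => if m = 0 then hightA_loop rest (ans - 1) else ans

def hight (metrix : List (List Int)) : Int :=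
  hightA_loop metrix (metrix.length : Int)

-- ===== PORT B =====
-- Source B's recursion: empty grid → 0; first row with max ≠ 0 → length of the whole
-- remaining grid; otherwise recurse on the tail. max of an empty first row raises
-- in Python (excluded by Pre_hight; the `none` branch's value 0 is arbitrary).
def hight_alt (metrix : List (List Int)) : Int :=
  match metrix with
  | [] => 0
  | line :: rest =>
    match PySem.List.max? line (fun y => y) with
    | none => 0
    | some m => if m ≠ 0 then ((line :: rest).length : Int) else hight_alt rest

-- ===== PRECONDITION & SPEC =====
-- Python raises ValueError (max of empty sequence) exactly when an empty row occurs
-- while all earlier rows are rows whose max is 0; Pre_ excludes exactly those inputs.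
def Pre_hight (metrix : List (List Int)) : Prop :=
  ∀ i, i < metrix.length →
    (∀ j, j < i → PySem.List.max? (metrix.getD j []) (fun y => y) = some 0) →
    metrix.getD i [] ≠ []

instance (metrix : List (List Int)) : Decidable (Pre_hight metrix) := by
  unfold Pre_hight; infer_instance

def pvWitness_hight : List (List Int) := [[0, 0], [0, -1], [3, 0]]

def Spec_hight (metrix : List (List Int)) (out : Int) : Prop := out = hight_alt metrix
instance (metrix : List (List Int)) (out : Int) : Decidable (Spec_hight metrix out) := by
  unfold Spec_hight; infer_instance

-- ===== CLAIM (what is proved, stated in full; the proofs are below) =====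
def Claim_equal_hight : Prop :=
  ∀ (metrix : List (List Int)), Dom_hight metrix → Pre_hight metrix →
    Spec_hight metrix (hight metrix)

-- ===== LEMMAS AND PROOFS =====

theorem pre_tail (line : List Int) (rest : List (List Int))
    (h : Pre_hight (line :: rest))
    (hm : PySem.List.max? line (fun y => y) = some 0) : Pre_hight rest := by
  intro i hi hj
  have := h (i + 1) (by simpa using Nat.succ_lt_succ hi)
  simp only [List.getD] at this ⊢
  apply this
  intro j hjlt
  cases j with
  | zero => simpa using hm
  | succ j => exact hj j (by omega)

theorem pre_head (line : List Int) (rest : List (List Int))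
    (h : Pre_hight (line :: rest)) : line ≠ [] := by
  have := h 0 (by simp) (by omega)
  simpa using this

theorem loop_eq_alt (lines : List (List Int)) (h : Pre_hight lines) :
    hightA_loop lines (lines.length : Int) = hight_alt lines := by
  induction lines with
  | nil => simp [hightA_loop, hight_alt]
  | cons line rest ih =>
    have hne : line ≠ [] := pre_head line rest h
    obtain ⟨m, hm⟩ : ∃ m, PySem.List.max? line (fun y => y) = some m := by
      cases hmx : PySem.List.max? line (fun y => y) with
      | none => exact absurd ((PySem.List.max?_eq_none_iff line (fun y => y)).mp hmx) hne
      | some m => exact ⟨m, rfl⟩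
    by_cases hm0 : m = 0
    · subst hm0
      have := ih (pre_tail line rest h hm)
      simp [hightA_loop, hight_alt, hm, this]
    · simp [hightA_loop, hight_alt, hm, hm0]

-- ===== VERDICT (by name: the statement is the Claim_ definition above) =====
theorem hight_spec : Claim_equal_hight := by
  intro metrix _ hpre
  unfold Spec_hight hight
  exact loop_eq_alt metrix hpre
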